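-- pv_equiv track=rewrite | github.com/snapsynapse/substack2md | substack2md/_core.py | remove_blank_after_headings
-- ===== SOURCE A (Python) =====
-- def remove_blank_after_headings(md: str) -> str:
--     lines = md.splitlines()
--     out = []
--     for i, line in enumerate(lines):
--         if out and out[-1].lstrip().startswith("#") and line.strip() == "":
--             continue
--         out.append(line)
--     return "\n".join(out)
-- ===== SOURCE B (Python) =====
-- def remove_blank_after_headings(md: str) -> str:
--     lines = md.splitlines()
--     out = []
--     i = 0
--     n = len(lines)
--     while i < n:
--         line = lines[i]
--         out.append(line)
--         i += 1
--         if line.lstrip().startswith("#"):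
--             while i < n and lines[i].strip() == "":
--                 i += 1
--     return "\n".join(out)
-- ===== Notes on version B (the rewrite author's own statement) =====
-- stated objective: alternative
-- what changed: Replaces A's per-line look-back at out[-1] with an index-driven outer loop that, upon appending a heading line, runs an inner loop consuming all immediately following blank lines; no inspection of the output list is needed.
import Mathlib
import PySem

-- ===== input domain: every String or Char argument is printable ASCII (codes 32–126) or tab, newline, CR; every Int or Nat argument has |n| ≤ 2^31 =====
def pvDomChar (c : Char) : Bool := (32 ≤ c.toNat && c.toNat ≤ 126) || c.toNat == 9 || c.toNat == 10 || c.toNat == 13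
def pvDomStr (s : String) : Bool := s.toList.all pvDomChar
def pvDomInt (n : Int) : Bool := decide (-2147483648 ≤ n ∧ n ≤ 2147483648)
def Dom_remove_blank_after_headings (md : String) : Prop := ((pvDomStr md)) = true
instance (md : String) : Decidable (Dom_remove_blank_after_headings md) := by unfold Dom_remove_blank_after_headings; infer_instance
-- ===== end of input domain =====

-- B replaces A's look-back at out[-1] with an index loop that consumes blanks right after a heading; same output.


-- shared tests: line.lstrip().startswith("#") and line.strip() == ""
def pvIsHead (l : String) : Bool := PySem.Str.startswith (PySem.Str.lstrip l) "#"
def pvIsBlank (l : String) : Bool := PySem.Str.strip l == ""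

-- ===== PORT A =====
-- 'out and out[-1].lstrip().startswith("#")': out[-1] of a nonempty list is its last element
def pvLastHead (out : List String) : Bool :=
  match out.getLast? with
  | some last => pvIsHead last
  | none => false

def remove_blank_after_headings (md : String) : String :=
  PySem.Str.join "\n" ((PySem.Str.splitlines md).foldl (fun out line =>
    if pvLastHead out && pvIsBlank line then out else out ++ [line]) [])

-- ===== PORT B =====
-- inner while: advance i past blank lines
def pvDropBlanks (ls : List String) : List String :=
  match ls with
  | [] => []
  | l :: rest => if pvIsBlank l then pvDropBlanks rest else l :: rest

theorem pvDropBlanks_length_le (ls : List String) : (pvDropBlanks ls).length ≤ ls.length := by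
  induction ls with
  | nil => simp [pvDropBlanks]
  | cons l rest ih =>
      simp only [pvDropBlanks]
      split
      · exact le_trans ih (Nat.le_succ _)
      · simp

-- outer while over the remaining lines
def pvBLoop (ls : List String) : List String :=
  match ls with
  | [] => []
  | l :: rest =>
      if pvIsHead l then l :: pvBLoop (pvDropBlanks rest)
      else l :: pvBLoop rest
termination_by ls.length
decreasing_by
  · exact Nat.lt_succ_of_le (pvDropBlanks_length_le rest)
  · simp

def remove_blank_after_headings_alt (md : String) : String :=
  PySem.Str.join "\n" (pvBLoop (PySem.Str.splitlines md))

-- ===== PRECONDITION & SPEC =====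
def Spec_remove_blank_after_headings (md : String) (out : String) : Prop := out = remove_blank_after_headings_alt md
instance (md : String) (out : String) : Decidable (Spec_remove_blank_after_headings md out) := by unfold Spec_remove_blank_after_headings; infer_instance

-- ===== CLAIM (what is proved, stated in full; the proofs are below) =====
def Claim_equal_remove_blank_after_headings : Prop := ∀ (md : String), Dom_remove_blank_after_headings md → Spec_remove_blank_after_headings md (remove_blank_after_headings md)

-- ===== LEMMAS AND PROOFS =====

-- the tail of A's output after a prefix whose last line is (h) a heading
def pvAux : Bool → List String → List String
  | _, [] => []
  | h, l :: rest => if h && pvIsBlank l then pvAux h rest else l :: pvAux (pvIsHead l) rest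

theorem pvBLoop_cons (l : String) (rest : List String) :
    pvBLoop (l :: rest) = if pvIsHead l then l :: pvBLoop (pvDropBlanks rest)
      else l :: pvBLoop rest := by
  rw [pvBLoop]

theorem pvFold_eq_aux (ls : List String) : ∀ out : List String,
    ls.foldl (fun out line => if pvLastHead out && pvIsBlank line then out else out ++ [line]) out
      = out ++ pvAux (pvLastHead out) ls := by
  induction ls with
  | nil => intro out; simp [pvAux]
  | cons l rest ih =>
      intro out
      simp only [List.foldl_cons, pvAux]
      by_cases hc : (pvLastHead out && pvIsBlank l) = true
      · rw [if_pos hc, if_pos hc, ih out]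
      · rw [if_neg hc, if_neg hc, ih (out ++ [l])]
        have hlast : pvLastHead (out ++ [l]) = pvIsHead l := by
          simp [pvLastHead]
        rw [hlast, List.append_assoc]
        rfl

theorem pvAux_eq_bLoop : ∀ n (ls : List String), ls.length ≤ n →
    pvAux false ls = pvBLoop ls ∧ pvAux true ls = pvBLoop (pvDropBlanks ls) := by
  intro n
  induction n with
  | zero =>
      intro ls h
      have : ls = [] := List.eq_nil_of_length_eq_zero (Nat.le_zero.mp h)
      subst this
      simp [pvAux, pvBLoop, pvDropBlanks]
  | succ n ih =>
      intro ls h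
      cases ls with
      | nil => simp [pvAux, pvBLoop, pvDropBlanks]
      | cons l rest =>
        have hrest : rest.length ≤ n := Nat.lt_succ_iff.mp (by simpa using h)
        constructor
        · rw [pvAux, pvBLoop_cons]
          simp only [Bool.false_and, if_neg Bool.false_ne_true]
          cases hh : pvIsHead l with
          | true => exact congrArg (l :: ·) ((ih rest hrest).2)
          | false => simp only [if_neg Bool.false_ne_true]; exact congrArg (l :: ·) ((ih rest hrest).1)
        · rw [pvAux, pvDropBlanks]
          cases hb : pvIsBlank l with
          | true =>
              simp only [Bool.true_and]
              exact (ih rest hrest).2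
          | false =>
              simp only [Bool.and_false, if_neg Bool.false_ne_true]
              rw [pvBLoop_cons]
              cases hh : pvIsHead l with
              | true => exact congrArg (l :: ·) ((ih rest hrest).2)
              | false => simp only [if_neg Bool.false_ne_true]; exact congrArg (l :: ·) ((ih rest hrest).1)

-- ===== VERDICT (by name: the statement is the Claim_ definition above) =====
theorem remove_blank_after_headings_spec : Claim_equal_remove_blank_after_headings := by
  intro md _
  unfold Spec_remove_blank_after_headings remove_blank_after_headings remove_blank_after_headings_alt
  rw [pvFold_eq_aux]
  have h := (pvAux_eq_bLoop (PySem.Str.splitlines md).length (PySem.Str.splitlines md) le_rfl).1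
  simp only [pvLastHead, List.getLast?_nil, List.nil_append, h]
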